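-- pv_equiv track=rewrite | github.com/L1ves/leetcode | Coding Meetup #9 - Higher-Order Functions Series - Is the meetup age-diverse?.py | is_age_diverse
-- ===== SOURCE A (Python) =====
-- def is_age_diverse(lst):
--     # your code here
--     age_group = {
--     'teens' : 0,
--     'twenties' : 0,
--     'thirties' : 0,
--     'forties' : 0,
--     'fifties' : 0,
--     'sixties' : 0,
--     'seventies' : 0,
--     'eighties' : 0,
--     'nineties' : 0,
--     'centenarian' : 0
-- }
--     for i in lst:
--         age = i['age']
--         if age < 20:
--             age_group['teens'] = 1
--         elif age < 30:
--             age_group['twenties'] = 1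
--         elif age < 40:
--             age_group['thirties'] = 1
--         elif age < 50:
--             age_group['forties'] = 1
--         elif age < 60:
--             age_group['fifties'] = 1
--         elif age < 70:
--             age_group['sixties'] = 1
--         elif age < 80:
--             age_group['seventies'] = 1
--         elif age < 90:
--             age_group['eighties'] = 1
--         elif age < 100:
--             age_group['nineties'] = 1
--         else:
--             age_group['centenarian'] = 1
--
--     for i in age_group.values():
--         if i == 0:
--             return False
--     return True
-- ===== SOURCE B (Python) =====
-- def is_age_diverse(lst):
--     ages = [p['age'] for p in lst]
--     return (any(a < 20 for a in ages)
--             and all(any(lo <= a < lo + 10 for a in ages) for lo in range(20, 100, 10))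
--             and any(a >= 100 for a in ages))
-- ===== Notes on version B (the rewrite author's own statement) =====
-- stated objective: alternative
-- what changed: Instead of one pass setting per-decade flags in a dict via an if-elif ladder, B runs a separate existential scan (any) over the ages for each of the ten decades and conjoins the results; no flag dict, no bucket accumulator is built.
-- outside the precondition, e.g. on is_age_diverse([{}]): A raises KeyError, B raises KeyError
import Mathlib
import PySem

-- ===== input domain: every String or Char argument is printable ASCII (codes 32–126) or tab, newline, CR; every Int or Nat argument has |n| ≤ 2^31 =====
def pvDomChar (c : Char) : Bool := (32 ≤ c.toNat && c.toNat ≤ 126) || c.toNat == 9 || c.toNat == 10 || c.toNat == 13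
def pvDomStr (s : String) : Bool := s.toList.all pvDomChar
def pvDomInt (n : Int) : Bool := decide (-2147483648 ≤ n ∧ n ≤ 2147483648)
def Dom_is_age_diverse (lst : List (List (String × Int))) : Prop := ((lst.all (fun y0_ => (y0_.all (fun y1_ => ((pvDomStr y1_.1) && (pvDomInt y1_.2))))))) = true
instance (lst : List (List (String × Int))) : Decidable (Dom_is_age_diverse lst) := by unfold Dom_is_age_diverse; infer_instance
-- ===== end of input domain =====

-- B replaces A's single pass with a flag dict and if-elif ladder by ten separate existential scans (any) over the ages, one per decade, conjoined (objective: alternative).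


-- ===== PORT A =====
-- the literal 10-key flag dict A builds
def pvInitGroups : PySem.Dict String Int :=
  PySem.Dict.ofList [("teens",0),("twenties",0),("thirties",0),("forties",0),("fifties",0),
    ("sixties",0),("seventies",0),("eighties",0),("nineties",0),("centenarian",0)]

-- one iteration of A's for-loop (i['age'] is the first match in the assoc list; Pre_ guarantees it exists)
def pvStepA (d : PySem.Dict String Int) (i : List (String × Int)) : PySem.Dict String Int :=
  let age := (i.lookup "age").getD 0
  if age < 20 then d.insert "teens" 1
  else if age < 30 then d.insert "twenties" 1
  else if age < 40 then d.insert "thirties" 1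
  else if age < 50 then d.insert "forties" 1
  else if age < 60 then d.insert "fifties" 1
  else if age < 70 then d.insert "sixties" 1
  else if age < 80 then d.insert "seventies" 1
  else if age < 90 then d.insert "eighties" 1
  else if age < 100 then d.insert "nineties" 1
  else d.insert "centenarian" 1

def is_age_diverse (lst : List (List (String × Int))) : Bool :=
  let d := lst.foldl pvStepA pvInitGroups
  -- 'for i in values: if i == 0: return False; return True'
  d.values.all (fun v => !(v == 0))

-- ===== PORT B =====
def is_age_diverse_alt (lst : List (List (String × Int))) : Bool :=
  let ages := lst.map (fun p => (p.lookup "age").getD 0)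
  (ages.any (fun a => a < 20))
    && ((PySem.List.pyRange 20 100 10).all (fun lo => ages.any (fun a => lo ≤ a && a < lo + 10)))
    && (ages.any (fun a => 100 ≤ a))

-- ===== PRECONDITION & SPEC =====
-- Pre_ excludes exactly the inputs where some person lacks an 'age' key, on which Python A raises KeyError.
def Pre_is_age_diverse (lst : List (List (String × Int))) : Prop :=
  ∀ i ∈ lst, "age" ∈ i.map Prod.fst
instance (lst : List (List (String × Int))) : Decidable (Pre_is_age_diverse lst) := by
  unfold Pre_is_age_diverse; infer_instance
def pvWitness_is_age_diverse : (List (List (String × Int))) := [[("age", 25)], [("age", 105)]]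

def Spec_is_age_diverse (lst : List (List (String × Int))) (out : Bool) : Prop := out = is_age_diverse_alt lst
instance (lst : List (List (String × Int))) (out : Bool) : Decidable (Spec_is_age_diverse lst out) := by unfold Spec_is_age_diverse; infer_instance

-- ===== CLAIM (what is proved, stated in full; the proofs are below) =====
def Claim_equal_is_age_diverse : Prop := ∀ (lst : List (List (String × Int))), Dom_is_age_diverse lst → Pre_is_age_diverse lst → Spec_is_age_diverse lst (is_age_diverse lst)

-- ===== LEMMAS AND PROOFS =====

-- the decade bucket of an age, used only in the proof to characterise both programs
def pvBucket (age : Int) : Int := min (max (age / 10) 1) 10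

-- the list of decade buckets of the input
def pvBuckets (lst : List (List (String × Int))) : List Int :=
  lst.map (fun i => pvBucket ((i.lookup "age").getD 0))

-- the shape A's accumulator dict always has
def mkD (b1 b2 b3 b4 b5 b6 b7 b8 b9 b10 : Int) : PySem.Dict String Int :=
  PySem.Dict.mk [("teens",b1),("twenties",b2),("thirties",b3),("forties",b4),("fifties",b5),
    ("sixties",b6),("seventies",b7),("eighties",b8),("nineties",b9),("centenarian",b10)]

-- mkD with the slot for bucket c set to 1
def setSlot (c b1 b2 b3 b4 b5 b6 b7 b8 b9 b10 : Int) : PySem.Dict String Int :=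
  mkD (if c = 1 then 1 else b1) (if c = 2 then 1 else b2) (if c = 3 then 1 else b3)
      (if c = 4 then 1 else b4) (if c = 5 then 1 else b5) (if c = 6 then 1 else b6)
      (if c = 7 then 1 else b7) (if c = 8 then 1 else b8) (if c = 9 then 1 else b9)
      (if c = 10 then 1 else b10)

lemma stepA_mkD (b1 b2 b3 b4 b5 b6 b7 b8 b9 b10 : Int) (i : List (String × Int)) :
    pvStepA (mkD b1 b2 b3 b4 b5 b6 b7 b8 b9 b10) i =
      setSlot (pvBucket ((i.lookup "age").getD 0)) b1 b2 b3 b4 b5 b6 b7 b8 b9 b10 := by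
  simp only [pvStepA]
  generalize (i.lookup "age").getD 0 = age
  rw [setSlot, pvBucket]
  by_cases h1 : age < 20
  · rw [if_pos h1, show min (max (age / 10) 1) 10 = 1 from by omega]
    norm_num [mkD, PySem.Dict.insert, PySem.Dict.contains]
    all_goals simp
  · rw [if_neg h1]
    by_cases h2 : age < 30
    · rw [if_pos h2, show min (max (age / 10) 1) 10 = 2 from by omega]
      norm_num [mkD, PySem.Dict.insert, PySem.Dict.contains]
      all_goals simp
    · rw [if_neg h2]
      by_cases h3 : age < 40
      · rw [if_pos h3, show min (max (age / 10) 1) 10 = 3 from by omega]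
        norm_num [mkD, PySem.Dict.insert, PySem.Dict.contains]
        all_goals simp
      · rw [if_neg h3]
        by_cases h4 : age < 50
        · rw [if_pos h4, show min (max (age / 10) 1) 10 = 4 from by omega]
          norm_num [mkD, PySem.Dict.insert, PySem.Dict.contains]
          all_goals simp
        · rw [if_neg h4]
          by_cases h5 : age < 60
          · rw [if_pos h5, show min (max (age / 10) 1) 10 = 5 from by omega]
            norm_num [mkD, PySem.Dict.insert, PySem.Dict.contains]
            all_goals simp
          · rw [if_neg h5]
            by_cases h6 : age < 70
            · rw [if_pos h6, show min (max (age / 10) 1) 10 = 6 from by omega]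
              norm_num [mkD, PySem.Dict.insert, PySem.Dict.contains]
              all_goals simp
            · rw [if_neg h6]
              by_cases h7 : age < 80
              · rw [if_pos h7, show min (max (age / 10) 1) 10 = 7 from by omega]
                norm_num [mkD, PySem.Dict.insert, PySem.Dict.contains]
                all_goals simp
              · rw [if_neg h7]
                by_cases h8 : age < 90
                · rw [if_pos h8, show min (max (age / 10) 1) 10 = 8 from by omega]
                  norm_num [mkD, PySem.Dict.insert, PySem.Dict.contains]
                  all_goals simp
                · rw [if_neg h8]
                  by_cases h9 : age < 100
                  · rw [if_pos h9, show min (max (age / 10) 1) 10 = 9 from by omega]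
                    norm_num [mkD, PySem.Dict.insert, PySem.Dict.contains]
                    all_goals simp
                  · rw [if_neg h9]
                    rw [show min (max (age / 10) 1) 10 = 10 from by omega]
                    norm_num [mkD, PySem.Dict.insert, PySem.Dict.contains]
                    all_goals simp

def updf (lst : List (List (String × Int))) (k b : Int) : Int :=
  if k ∈ pvBuckets lst then 1 else b

lemma updf_cons (i : List (String × Int)) (t : List (List (String × Int))) (k b : Int) :
    updf (i :: t) k b = updf t k (if pvBucket ((i.lookup "age").getD 0) = k then 1 else b) := by
  simp only [updf, pvBuckets, List.map_cons, List.mem_cons]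
  by_cases h : pvBucket ((i.lookup "age").getD 0) = k
  · simp [h]
  · simp [h, Ne.symm h]

lemma foldl_stepA (lst : List (List (String × Int))) :
    ∀ b1 b2 b3 b4 b5 b6 b7 b8 b9 b10 : Int,
      lst.foldl pvStepA (mkD b1 b2 b3 b4 b5 b6 b7 b8 b9 b10) =
        mkD (updf lst 1 b1) (updf lst 2 b2) (updf lst 3 b3) (updf lst 4 b4) (updf lst 5 b5)
            (updf lst 6 b6) (updf lst 7 b7) (updf lst 8 b8) (updf lst 9 b9) (updf lst 10 b10) := by
  induction lst with
  | nil => intro b1 b2 b3 b4 b5 b6 b7 b8 b9 b10; simp [updf, pvBuckets]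
  | cons i t ih =>
    intro b1 b2 b3 b4 b5 b6 b7 b8 b9 b10
    rw [List.foldl_cons, stepA_mkD, setSlot, ih]
    simp only [updf_cons]

lemma a_char (lst : List (List (String × Int))) :
    is_age_diverse lst = true ↔ ∀ k ∈ ([1,2,3,4,5,6,7,8,9,10] : List Int), k ∈ pvBuckets lst := by
  unfold is_age_diverse
  rw [show pvInitGroups = mkD 0 0 0 0 0 0 0 0 0 0 from rfl, foldl_stepA]
  simp [mkD, PySem.Dict.values, updf]

-- k ∈ pvBuckets lst is exactly "some age has bucket k"
lemma mem_pvBuckets (lst : List (List (String × Int))) (k : Int) :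
    k ∈ pvBuckets lst ↔
      ∃ a ∈ lst.map (fun p => (p.lookup "age").getD 0), pvBucket a = k := by
  simp [pvBuckets, List.mem_map]

lemma b_char (lst : List (List (String × Int))) :
    is_age_diverse_alt lst = true ↔ ∀ k ∈ ([1,2,3,4,5,6,7,8,9,10] : List Int), k ∈ pvBuckets lst := by
  unfold is_age_diverse_alt
  rw [show PySem.List.pyRange 20 100 10 = [20,30,40,50,60,70,80,90] from by decide]
  simp only [Bool.and_eq_true, List.all_cons, List.all_nil, List.any_eq_true, Bool.and_true,
    decide_eq_true_eq, List.forall_mem_cons, List.not_mem_nil, false_implies, implies_true, and_true, mem_pvBuckets]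
  constructor
  · rintro ⟨⟨h1, h2, h3, h4, h5, h6, h7, h8, h9⟩, h10⟩
    refine ⟨?_, ?_, ?_, ?_, ?_, ?_, ?_, ?_, ?_, ?_⟩
    · obtain ⟨a, ha, hp⟩ := h1; exact ⟨a, ha, by unfold pvBucket; omega⟩
    · obtain ⟨a, ha, hp⟩ := h2; exact ⟨a, ha, by unfold pvBucket; omega⟩
    · obtain ⟨a, ha, hp⟩ := h3; exact ⟨a, ha, by unfold pvBucket; omega⟩
    · obtain ⟨a, ha, hp⟩ := h4; exact ⟨a, ha, by unfold pvBucket; omega⟩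
    · obtain ⟨a, ha, hp⟩ := h5; exact ⟨a, ha, by unfold pvBucket; omega⟩
    · obtain ⟨a, ha, hp⟩ := h6; exact ⟨a, ha, by unfold pvBucket; omega⟩
    · obtain ⟨a, ha, hp⟩ := h7; exact ⟨a, ha, by unfold pvBucket; omega⟩
    · obtain ⟨a, ha, hp⟩ := h8; exact ⟨a, ha, by unfold pvBucket; omega⟩
    · obtain ⟨a, ha, hp⟩ := h9; exact ⟨a, ha, by unfold pvBucket; omega⟩
    · obtain ⟨a, ha, hp⟩ := h10; exact ⟨a, ha, by unfold pvBucket; omega⟩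
  · rintro ⟨g1, g2, g3, g4, g5, g6, g7, g8, g9, g10⟩
    refine ⟨⟨?_, ?_, ?_, ?_, ?_, ?_, ?_, ?_, ?_⟩, ?_⟩
    · obtain ⟨a, ha, hp⟩ := g1; exact ⟨a, ha, by unfold pvBucket at hp; omega⟩
    · obtain ⟨a, ha, hp⟩ := g2; exact ⟨a, ha, by unfold pvBucket at hp; omega⟩
    · obtain ⟨a, ha, hp⟩ := g3; exact ⟨a, ha, by unfold pvBucket at hp; omega⟩
    · obtain ⟨a, ha, hp⟩ := g4; exact ⟨a, ha, by unfold pvBucket at hp; omega⟩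
    · obtain ⟨a, ha, hp⟩ := g5; exact ⟨a, ha, by unfold pvBucket at hp; omega⟩
    · obtain ⟨a, ha, hp⟩ := g6; exact ⟨a, ha, by unfold pvBucket at hp; omega⟩
    · obtain ⟨a, ha, hp⟩ := g7; exact ⟨a, ha, by unfold pvBucket at hp; omega⟩
    · obtain ⟨a, ha, hp⟩ := g8; exact ⟨a, ha, by unfold pvBucket at hp; omega⟩
    · obtain ⟨a, ha, hp⟩ := g9; exact ⟨a, ha, by unfold pvBucket at hp; omega⟩
    · obtain ⟨a, ha, hp⟩ := g10; exact ⟨a, ha, by unfold pvBucket at hp; omega⟩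

-- ===== VERDICT (by name: the statement is the Claim_ definition above) =====
theorem is_age_diverse_spec : Claim_equal_is_age_diverse := by
  intro lst _ _
  unfold Spec_is_age_diverse
  have := (a_char lst).trans (b_char lst).symm
  cases hA : is_age_diverse lst <;> cases hB : is_age_diverse_alt lst <;> simp_all
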